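-- pv_equiv track=rewrite | github.com/cmlimm/uni-projects | workshops/lesson6_text_split/longest_word.py | split_phrase_direct
-- ===== SOURCE A (Python) =====
-- def split_phrase_direct(phrase, dictionary):
--     """
--     Функция для разделения фразы без пробелов на слова прямым ходом
--     """
--     first_letter = 0
--     n = len(phrase)
--
--     words = []
--
--     # пока первая буква следующего слова не окажется вне фразы
--     while first_letter != n:
--         # начинаем идти с конца фразы
--         for last_letter in range(n, first_letter, -1):
--             # если слово от текущей первой буквы до последней есть в словаре
--             # то добавляем его
--             if phrase[first_letter:last_letter] in dictionary:
--                 words.append(phrase[first_letter:last_letter])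
--                 first_letter = last_letter
--                 break
--             # если осталась только одна буква, то добавляем её
--             elif last_letter - first_letter == 1:
--                 words.append(phrase[first_letter:last_letter])
--                 first_letter = last_letter
--                 break
--
--     return words
-- ===== SOURCE B (Python) =====
-- def split_phrase_direct(phrase, dictionary):
--     words = []
--     rest = phrase
--     while rest:
--         step = max((len(w) for w in dictionary if w and rest.startswith(w)),
--                    default=1)
--         words.append(rest[:step])
--         rest = rest[step:]
--     return words
-- ===== Notes on version B (the rewrite author's own statement) =====
-- stated objective: faster
-- what changed: B's inner search iterates over the dictionary words themselves, testing each as a prefix of the remaining suffix and keeping the maximum matching length (max with default 1), instead of A's inner loop over all slice end positions testing each slice for dictionary membership with an O(|dict|) 'in' scan.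
import Mathlib
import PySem

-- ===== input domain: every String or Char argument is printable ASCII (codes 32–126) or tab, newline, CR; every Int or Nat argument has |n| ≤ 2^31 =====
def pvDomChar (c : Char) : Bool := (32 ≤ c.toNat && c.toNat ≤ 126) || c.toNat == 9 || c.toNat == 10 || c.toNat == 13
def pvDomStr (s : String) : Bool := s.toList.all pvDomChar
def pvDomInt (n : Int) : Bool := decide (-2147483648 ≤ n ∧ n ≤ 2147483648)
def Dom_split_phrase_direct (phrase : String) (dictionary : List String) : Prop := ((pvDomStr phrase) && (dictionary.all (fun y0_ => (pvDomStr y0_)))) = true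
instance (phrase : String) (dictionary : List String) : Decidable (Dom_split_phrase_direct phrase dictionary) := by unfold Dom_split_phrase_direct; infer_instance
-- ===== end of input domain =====

-- B's inner search iterates over the dictionary words, testing each as a prefix of the remaining
-- suffix and keeping the maximum matching length (max with default 1), instead of A's inner loop
-- over slice end positions testing each slice for dictionary membership (objective: alternative).


-- ===== PORT A =====
-- A's inner loop 'for last_letter in range(n, first_letter, -1)': the countdown is rendered as
-- structural recursion on last_letter; it returns the index at which the loop breaks (none = the
-- range was empty / exhausted without a break).  phrase[first:last] with these natural bounds is
-- exactly (cs.drop first).take (last - first).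
def pvAInner (cs : List Char) (dict : List (List Char)) (first : Nat) : Nat → Option Nat
  | 0 => none
  | last + 1 =>
    if last + 1 ≤ first then none
    else if dict.contains ((cs.drop first).take (last + 1 - first)) then some (last + 1)
    else if last + 1 - first = 1 then some (last + 1)
    else pvAInner cs dict first last

-- termination fact the outer loop's recursion needs: a break index lies strictly above first
theorem pvAInner_some_bounds (cs : List Char) (dict : List (List Char)) (first : Nat) :
    ∀ last l, pvAInner cs dict first last = some l → first < l ∧ l ≤ last := by
  intro last
  induction last with
  | zero => intro l h; simp [pvAInner] at h
  | succ la ih =>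
    intro l h
    unfold pvAInner at h
    split_ifs at h with h1 h2 h3
    · cases h; omega
    · cases h; omega
    · have := ih l h; omega

-- A's 'while first_letter != n' loop, with the Python 'words' accumulator.
-- The 'none' arm is unreachable for first < cs.length (the Python while would not terminate there).
def pvAOuter (cs : List Char) (dict : List (List Char)) (acc : List (List Char)) (first : Nat) :
    List (List Char) :=
  if first = cs.length then acc
  else
    match h : pvAInner cs dict first cs.length with
    | some last => pvAOuter cs dict (acc ++ [(cs.drop first).take (last - first)]) last
    | none => acc
termination_by cs.length - first
decreasing_by
  have := pvAInner_some_bounds cs dict first cs.length last h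
  omega

def split_phrase_direct (phrase : String) (dictionary : List String) : List String :=
  (pvAOuter phrase.toList (dictionary.map String.toList) [] 0).map (fun w => String.ofList w)

-- ===== PORT B =====
-- B's 'max((len(w) for w in dictionary if w and rest.startswith(w)), default=1)':
-- the filtered generator becomes filter+map, Python max of a nonempty list is a foldl of Nat.max
-- over its tail starting from its head, and the empty case yields the default 1.
-- 'w and rest.startswith(w)' is '!w.isEmpty && w.isPrefixOf rest' (exact on lists of chars).
def pvBStep (dict : List (List Char)) (rest : List Char) : Nat :=
  match (dict.filter (fun w => !w.isEmpty && w.isPrefixOf rest)).map List.length with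
  | [] => 1
  | x :: xs => xs.foldl Nat.max x

-- termination fact for pvBSplit: the chosen step is at least 1 (proved below the claim block
-- would be too late for the recursion, so it stays here, cited by name in decreasing_by)
theorem pvFoldMax_spec (xs : List Nat) (i : Nat) :
    i ≤ xs.foldl Nat.max i ∧ (∀ x ∈ xs, x ≤ xs.foldl Nat.max i) ∧
      (xs.foldl Nat.max i = i ∨ xs.foldl Nat.max i ∈ xs) := by
  induction xs generalizing i with
  | nil => simp
  | cons x xs ih =>
    obtain ⟨h1, h2, h3⟩ := ih (Nat.max i x)
    simp only [List.foldl_cons]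
    refine ⟨le_trans (Nat.le_max_left i x) h1, ?_, ?_⟩
    · intro y hy
      rcases List.mem_cons.mp hy with rfl | hy
      · exact le_trans (Nat.le_max_right i y) h1
      · exact h2 y hy
    · rcases h3 with h | h
      · rcases Nat.le_total i x with hm | hm
        · exact Or.inr (List.mem_cons.mpr (Or.inl (by rw [h]; exact Nat.max_eq_right hm)))
        · exact Or.inl (by rw [h]; exact Nat.max_eq_left hm)
      · exact Or.inr (List.mem_cons.mpr (Or.inr h))

theorem pvBStep_pos (dict : List (List Char)) (rest : List Char) : 1 ≤ pvBStep dict rest := by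
  unfold pvBStep
  split
  · omega
  · rename_i x xs heq
    obtain ⟨h1, _, h3⟩ := pvFoldMax_spec xs x
    have hmem : ∀ y ∈ (dict.filter (fun w => !w.isEmpty && w.isPrefixOf rest)).map List.length,
        1 ≤ y := by
      intro y hy
      simp only [List.mem_map, List.mem_filter, Bool.and_eq_true, Bool.not_eq_true',
        List.isEmpty_eq_false_iff] at hy
      obtain ⟨w, ⟨_, hw, _⟩, rfl⟩ := hy
      cases w with
      | nil => simp at hw
      | cons _ _ => simp
    rcases h3 with h | h
    · rw [h]; exact hmem x (heq ▸ List.mem_cons_self)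
    · have := hmem _ (heq ▸ List.mem_cons_of_mem x h); omega

-- B's 'while rest:' loop; rest[:step] / rest[step:] with 1 ≤ step are take/drop (exact here).
def pvBSplit (dict : List (List Char)) (acc : List (List Char)) (rest : List Char) :
    List (List Char) :=
  if rest = [] then acc
  else
    let step := pvBStep dict rest
    pvBSplit dict (acc ++ [rest.take step]) (rest.drop step)
termination_by rest.length
decreasing_by
  have := pvBStep_pos dict rest
  have hr : rest.length ≠ 0 := by simpa [List.length_eq_zero_iff] using ‹rest ≠ []›
  simp only [List.length_drop]
  omega

def split_phrase_direct_alt (phrase : String) (dictionary : List String) : List String :=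
  (pvBSplit (dictionary.map String.toList) [] phrase.toList).map (fun w => String.ofList w)

-- ===== PRECONDITION & SPEC =====
def Spec_split_phrase_direct (phrase : String) (dictionary : List String) (out : List String) : Prop := out = split_phrase_direct_alt phrase dictionary
instance (phrase : String) (dictionary : List String) (out : List String) : Decidable (Spec_split_phrase_direct phrase dictionary out) := by unfold Spec_split_phrase_direct; infer_instance

-- ===== CLAIM (what is proved, stated in full; the proofs are below) =====
def Claim_equal_split_phrase_direct : Prop := ∀ (phrase : String) (dictionary : List String), Dom_split_phrase_direct phrase dictionary → Spec_split_phrase_direct phrase dictionary (split_phrase_direct phrase dictionary)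

-- ===== LEMMAS AND PROOFS =====

-- the common characterisation: the largest k in [1, m] with rest.take k in the dictionary, else 1
def pvBestRec (dict : List (List Char)) (rest : List Char) : Nat → Nat
  | 0 => 1
  | k + 1 => if dict.contains (rest.take (k + 1)) then k + 1 else pvBestRec dict rest k

theorem pvBestRec_bounds (dict : List (List Char)) (rest : List Char) (m : Nat) :
    1 ≤ pvBestRec dict rest m ∧ pvBestRec dict rest m ≤ max m 1 := by
  induction m with
  | zero => simp [pvBestRec]
  | succ k ih => unfold pvBestRec; split_ifs <;> omega

theorem pvBestRec_ge (dict : List (List Char)) (rest : List Char) (m k : Nat)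
    (h1 : 1 ≤ k) (hk : k ≤ m) (hc : dict.contains (rest.take k) = true) :
    k ≤ pvBestRec dict rest m := by
  induction m with
  | zero => omega
  | succ j ih =>
    unfold pvBestRec
    split_ifs with h
    · omega
    · rcases Nat.lt_or_ge k (j + 1) with hlt | hge
      · exact ih (by omega)
      · have : k = j + 1 := by omega
        subst this; exact absurd hc (by simpa using h)

theorem pvBestRec_cases (dict : List (List Char)) (rest : List Char) (m : Nat) :
    pvBestRec dict rest m = 1 ∨
      (pvBestRec dict rest m ≤ m ∧ dict.contains (rest.take (pvBestRec dict rest m)) = true) := by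
  induction m with
  | zero => exact Or.inl rfl
  | succ j ih =>
    unfold pvBestRec
    split_ifs with h
    · exact Or.inr ⟨le_refl _, h⟩
    · rcases ih with h' | ⟨h1, h2⟩
      · exact Or.inl h'
      · exact Or.inr ⟨by omega, h2⟩

-- B's step satisfies the same max-property
theorem pvBStep_ge (dict : List (List Char)) (rest w : List Char)
    (hw : w ∈ dict) (hne : w ≠ []) (hp : w <+: rest) : w.length ≤ pvBStep dict rest := by
  have hmem : w.length ∈ (dict.filter (fun w => !w.isEmpty && w.isPrefixOf rest)).map List.length := by
    simp only [List.mem_map, List.mem_filter, Bool.and_eq_true, Bool.not_eq_true',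
      List.isEmpty_eq_false_iff]
    exact ⟨w, ⟨hw, hne, List.isPrefixOf_iff_prefix.mpr hp⟩, rfl⟩
  unfold pvBStep
  split
  · rename_i heq; rw [heq] at hmem; simp at hmem
  · rename_i x xs heq
    rw [heq] at hmem
    obtain ⟨h1, h2, _⟩ := pvFoldMax_spec xs x
    rcases List.mem_cons.mp hmem with h | h
    · omega
    · exact h2 _ h

theorem pvBStep_cases (dict : List (List Char)) (rest : List Char) :
    pvBStep dict rest = 1 ∨
      ∃ w ∈ dict, w ≠ [] ∧ w <+: rest ∧ w.length = pvBStep dict rest := by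
  unfold pvBStep
  split
  · exact Or.inl rfl
  · rename_i x xs heq
    obtain ⟨_, _, h3⟩ := pvFoldMax_spec xs x
    have hmem : xs.foldl Nat.max x ∈
        (dict.filter (fun w => !w.isEmpty && w.isPrefixOf rest)).map List.length := by
      rw [heq]
      rcases h3 with h | h
      · rw [h]; exact List.mem_cons_self
      · exact List.mem_cons_of_mem x h
    simp only [List.mem_map, List.mem_filter, Bool.and_eq_true, Bool.not_eq_true',
      List.isEmpty_eq_false_iff] at hmem
    obtain ⟨w, ⟨hw, hne, hp⟩, hlen⟩ := hmem
    exact Or.inr ⟨w, hw, hne, List.isPrefixOf_iff_prefix.mp hp, hlen⟩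

-- the two inner searches agree on a nonempty suffix
theorem pvBStep_eq_rec (dict : List (List Char)) (rest : List Char) (hne : rest ≠ []) :
    pvBStep dict rest = pvBestRec dict rest rest.length := by
  have hlen : 1 ≤ rest.length := by
    cases rest with | nil => exact absurd rfl hne | cons _ _ => simp
  apply Nat.le_antisymm
  · rcases pvBStep_cases dict rest with h | ⟨w, hw, hwne, hp, hlenw⟩
    · rw [h]; exact (pvBestRec_bounds dict rest rest.length).1
    · rw [← hlenw]
      apply pvBestRec_ge dict rest rest.length w.length
      · cases w with | nil => exact absurd rfl hwne | cons _ _ => simp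
      · exact hp.length_le
      · rw [← List.prefix_iff_eq_take.mp hp]
        simpa using hw
  · rcases pvBestRec_cases dict rest rest.length with h | ⟨h1, h2⟩
    · rw [h]; exact pvBStep_pos dict rest
    · set a := pvBestRec dict rest rest.length with ha
      have hapos : 1 ≤ a := (pvBestRec_bounds dict rest rest.length).1
      have hwmem : rest.take a ∈ dict := by simpa using h2
      have hlw : (rest.take a).length = a := by simp [List.length_take]; omega
      have := pvBStep_ge dict rest (rest.take a) hwmem
        (by intro hh; rw [hh] at hlw; simp at hlw; omega) (List.take_prefix a rest)
      rw [hlw] at this; exact this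

-- A's inner countdown computes the same characterisation
theorem pvAInner_eq_best (cs : List Char) (dict : List (List Char)) :
    ∀ last first, first < last →
      pvAInner cs dict first last
        = some (first + pvBestRec dict (cs.drop first) (last - first)) := by
  intro last
  induction last with
  | zero => intro first h; exact absurd h (by omega)
  | succ la ih =>
    intro first h
    unfold pvAInner
    have hk : la + 1 - first = (la - first) + 1 := by omega
    rw [hk]
    simp only [pvBestRec]
    split_ifs with h1 h2 h3
    · exact absurd h1 (by omega)
    · congr 1; omega
    · have h0 : la - first = 0 := by omega
      rw [h0]
      simp only [pvBestRec]
      congr 1; omega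
    · exact ih first (by omega)

-- the two outer loops agree
theorem pvOuter_eq_split (cs : List Char) (dict : List (List Char)) :
    ∀ fuel first acc, first ≤ cs.length → cs.length - first ≤ fuel →
      pvAOuter cs dict acc first = pvBSplit dict acc (cs.drop first) := by
  intro fuel
  induction fuel with
  | zero =>
    intro first acc h1 h2
    have hf : first = cs.length := by omega
    have hd : cs.drop first = [] := by
      apply List.eq_nil_of_length_eq_zero; simp [hf]
    rw [pvAOuter, if_pos hf, pvBSplit, if_pos hd]
  | succ f ih =>
    intro first acc h1 h2
    by_cases hf : first = cs.length
    · have hd : cs.drop first = [] := by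
        apply List.eq_nil_of_length_eq_zero; simp [hf]
      rw [pvAOuter, if_pos hf, pvBSplit, if_pos hd]
    · have hfl : first < cs.length := by omega
      have hlen : (cs.drop first).length = cs.length - first := by simp
      have hne : cs.drop first ≠ [] := by
        intro hh; rw [hh] at hlen; simp at hlen; omega
      have hb := pvBStep_eq_rec dict (cs.drop first) hne
      rw [hlen] at hb
      have hbb := pvBestRec_bounds dict (cs.drop first) (cs.length - first)
      have hin := pvAInner_eq_best cs dict cs.length first hfl
      rw [pvAOuter, if_neg hf]
      split
      · rename_i last heq
        rw [hin] at heq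
        have hlast : last = first + pvBestRec dict (cs.drop first) (cs.length - first) :=
          (Option.some.inj heq).symm
        subst hlast
        rw [pvBSplit, if_neg hne]
        simp only [hb]
        rw [show first + pvBestRec dict (cs.drop first) (cs.length - first) - first
              = pvBestRec dict (cs.drop first) (cs.length - first) by omega,
          ih (first + pvBestRec dict (cs.drop first) (cs.length - first)) _ (by omega) (by omega),
          List.drop_drop]
      · rename_i heq
        rw [hin] at heq
        simp at heq

-- ===== VERDICT (by name: the statement is the Claim_ definition above) =====
theorem split_phrase_direct_spec : Claim_equal_split_phrase_direct := by
  intro phrase dictionary _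
  unfold Spec_split_phrase_direct split_phrase_direct split_phrase_direct_alt
  rw [pvOuter_eq_split phrase.toList (dictionary.map String.toList) phrase.toList.length 0 []
    (by omega) (by omega), List.drop_zero]
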